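-- pv_equiv track=rewrite | github.com/adityakumar080807-tech/Library-Management-System-Python | third proj.py | calculate_fine
-- ===== SOURCE A (Python) =====
-- def calculate_fine(days_late):
--     fine = 0
--     rate = 10
--     week = 1
--
--     while days_late > 0:
--         days_in_week = min(7, days_late)
--         fine += days_in_week * rate
--         days_late -= days_in_week
--         week += 1
--         rate = rate * week   # increasing rate
--
--     return fine
-- ===== SOURCE B (Python) =====
-- def calculate_fine(days_late):
--     if days_late <= 0:
--         return 0
--     weeks, rem = divmod(days_late, 7)
--     # Horner evaluation back-to-front: the partial week's days are the innermost
--     # coefficient; each enclosing full week contributes 7 days and scales the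
--     # inner total by the next week's rate multiplier.  No running rate/factorial.
--     acc = rem
--     while weeks > 0:
--         acc = 7 + (weeks + 1) * acc
--         weeks -= 1
--     return 10 * acc
-- ===== Notes on version B (the rewrite author's own statement) =====
-- stated objective: alternative
-- what changed: B drops A's forward chunk-decrementing loop with its mutating fine/rate/week accumulators: it splits days into (weeks, rem) by divmod and evaluates the fine as a back-to-front Horner scheme (acc = 7 + (k+1)*acc from the innermost partial week outward), with one final multiply by 10 and no running rate or factorial.
import Mathlib
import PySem

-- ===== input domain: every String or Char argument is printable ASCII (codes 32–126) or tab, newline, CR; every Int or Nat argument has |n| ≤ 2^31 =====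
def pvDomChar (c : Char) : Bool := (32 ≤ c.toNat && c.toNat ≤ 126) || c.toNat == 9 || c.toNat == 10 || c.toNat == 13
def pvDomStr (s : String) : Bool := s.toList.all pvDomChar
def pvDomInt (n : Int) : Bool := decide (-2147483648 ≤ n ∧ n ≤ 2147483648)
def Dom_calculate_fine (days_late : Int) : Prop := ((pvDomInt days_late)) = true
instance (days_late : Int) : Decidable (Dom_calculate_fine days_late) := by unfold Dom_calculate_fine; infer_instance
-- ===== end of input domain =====

-- B replaces A's forward chunk loop (mutating fine/rate/week) by a divmod split plus a
-- back-to-front Horner evaluation with one multiply-add per week; objective: alternative.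

-- ===== PORT A =====
-- A's while loop, state (days_late, fine, rate, week)
def pvFineLoop (days_late fine rate week : Int) : Int :=
  if h : days_late > 0 then
    let days_in_week := min 7 days_late
    pvFineLoop (days_late - days_in_week) (fine + days_in_week * rate)
      (rate * (week + 1)) (week + 1)
  else fine
termination_by days_late.toNat
decreasing_by
  simp only [Int.lt_iff_add_one_le] at h
  omega

def calculate_fine (days_late : Int) : Int :=
  pvFineLoop days_late 0 10 1

-- ===== PORT B =====
-- B's while loop, state (weeks, acc)
def pvHornerLoop (weeks acc : Int) : Int :=
  if h : weeks > 0 then pvHornerLoop (weeks - 1) (7 + (weeks + 1) * acc) else acc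
termination_by weeks.toNat
decreasing_by
  simp only [Int.lt_iff_add_one_le] at h
  omega

def calculate_fine_alt (days_late : Int) : Int :=
  if days_late ≤ 0 then 0
  else 10 * pvHornerLoop (PySem.Int.floordiv days_late 7) (PySem.Int.mod days_late 7)

-- ===== PRECONDITION & SPEC =====
def Spec_calculate_fine (days_late : Int) (out : Int) : Prop := out = calculate_fine_alt days_late
instance (days_late : Int) (out : Int) : Decidable (Spec_calculate_fine days_late out) := by unfold Spec_calculate_fine; infer_instance

-- ===== CLAIM (what is proved, stated in full; the proofs are below) =====
def Claim_equal_calculate_fine : Prop := ∀ (days_late : Int), Dom_calculate_fine days_late → Spec_calculate_fine days_late (calculate_fine days_late)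

-- ===== LEMMAS AND PROOFS =====

-- the Horner value with q full weeks, entering week w, innermost coefficient r
def pvHorner (q : Nat) (w r : Int) : Int :=
  match q with
  | 0 => r
  | Nat.succ q' => 7 + (w + 1) * pvHorner q' (w + 1) r

theorem pvFineLoop_eq_horner (q : Nat) :
    ∀ (r w f fine : Int), 0 ≤ r → r < 7 →
      pvFineLoop (7 * (q : Int) + r) fine (10 * f) w
        = fine + 10 * f * pvHorner q w r := by
  induction q with
  | zero =>
    intro r w f fine h0 h7
    rcases eq_or_lt_of_le h0 with h | h
    · rw [pvFineLoop]
      simp [← h, pvHorner]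
    · rw [pvFineLoop, dif_pos (by push_cast; omega)]
      have hmin : min 7 (7 * ((0 : Nat) : Int) + r) = r := by
        rw [show 7 * ((0 : Nat) : Int) + r = r from by push_cast; ring]
        exact min_eq_right (by omega)
      simp only [hmin]
      rw [show 7 * ((0 : Nat) : Int) + r - r = (0 : Int) from by push_cast; ring]
      rw [pvFineLoop]
      simp [pvHorner]
      ring
  | succ q' ih =>
    intro r w f fine h0 h7
    rw [pvFineLoop, dif_pos (by push_cast; omega)]
    have hmin : min 7 (7 * ((Nat.succ q' : Nat) : Int) + r) = 7 :=
      min_eq_left (by push_cast; omega)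
    simp only [hmin]
    rw [show 7 * ((Nat.succ q' : Nat) : Int) + r - 7 = 7 * ((q' : Nat) : Int) + r from by
          push_cast; ring,
        show (10 : Int) * f * (w + 1) = 10 * (f * (w + 1)) from by ring,
        ih r (w + 1) (f * (w + 1)) (fine + 7 * (10 * f)) h0 h7]
    simp only [pvHorner]
    ring

theorem pvHornerLoop_eq (m : Nat) :
    ∀ (p : Nat) (r : Int),
      pvHornerLoop (m : Int) (pvHorner p ((m : Int) + 1) r) = pvHorner (m + p) 1 r := by
  induction m with
  | zero =>
    intro p r
    rw [pvHornerLoop]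
    simp
  | succ m' ih =>
    intro p r
    rw [pvHornerLoop, dif_pos (by push_cast; omega)]
    rw [show ((Nat.succ m' : Nat) : Int) - 1 = ((m' : Nat) : Int) from by push_cast; ring]
    have hstep : 7 + (((Nat.succ m' : Nat) : Int) + 1) * pvHorner p (((Nat.succ m' : Nat) : Int) + 1) r
        = pvHorner (p + 1) (((m' : Nat) : Int) + 1) r := by
      simp only [pvHorner]
      push_cast
      ring_nf
    rw [hstep, ih (p + 1) r]
    congr 1
    omega

theorem pvMain (d : Int) : calculate_fine d = calculate_fine_alt d := by
  by_cases hd : d ≤ 0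
  · unfold calculate_fine calculate_fine_alt
    rw [pvFineLoop, dif_neg (by omega), if_pos hd]
  · obtain ⟨r, hrdef⟩ : ∃ r, PySem.Int.mod d 7 = r := ⟨_, rfl⟩
    have hr0 : 0 ≤ r := hrdef ▸ PySem.Int.mod_nonneg d (by norm_num)
    have hr7 : r < 7 := hrdef ▸ PySem.Int.mod_lt d (by norm_num)
    have hsum : PySem.Int.floordiv d 7 * 7 + r = d :=
      hrdef ▸ PySem.Int.floordiv_mul_add_mod d 7
    have hfw0 : 0 ≤ PySem.Int.floordiv d 7 := by nlinarith
    obtain ⟨q, hq⟩ : ∃ q : Nat, PySem.Int.floordiv d 7 = (q : Int) :=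
      ⟨(PySem.Int.floordiv d 7).toNat, (Int.toNat_of_nonneg hfw0).symm⟩
    have hA : calculate_fine d = 10 * pvHorner q 1 r := by
      unfold calculate_fine
      rw [show d = 7 * (q : Int) + r from by omega,
          show (10 : Int) = 10 * (1 : Int) from by norm_num,
          pvFineLoop_eq_horner q r 1 1 0 hr0 hr7]
      ring
    have hB : calculate_fine_alt d = 10 * pvHorner q 1 r := by
      unfold calculate_fine_alt
      rw [if_neg hd, hq, hrdef]
      have := pvHornerLoop_eq q 0 r
      simp only [pvHorner, Nat.add_zero] at this
      rw [this]
    rw [hA, hB]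

-- ===== VERDICT (by name: the statement is the Claim_ definition above) =====
theorem calculate_fine_spec : Claim_equal_calculate_fine := by
  intro d _
  unfold Spec_calculate_fine
  exact pvMain d
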